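-- pv_equiv track=rewrite | github.com/kelvinhuang0327/number-pattern-research | tools/backtest_biglotto_enhancements.py | tail_balance_bet
-- ===== SOURCE A (Python) =====
-- from collections import Counter, defaultdict
--
-- MAX_NUM = 49
--
-- def tail_balance_bet(history, window=100, exclude=None):
--     exclude = exclude or set()
--     recent = history[-window:] if len(history) >= window else history
--     all_nums = [n for d in recent for n in d['numbers']]
--     freq = Counter(all_nums)
--     tail_groups = {i: [] for i in range(10)}
--     for n in range(1, MAX_NUM + 1):
--         if n not in exclude:
--             tail_groups[n % 10].append((n, freq.get(n, 0)))
--     for t in tail_groups: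
--         tail_groups[t].sort(key=lambda x: x[1], reverse=True)
--     selected = []
--     available_tails = sorted(
--         [t for t in range(10) if tail_groups[t]],
--         key=lambda t: tail_groups[t][0][1] if tail_groups[t] else 0,
--         reverse=True
--     )
--     idx_in_group = {t: 0 for t in range(10)}
--     while len(selected) < 6:
--         added = False
--         for tail in available_tails:
--             if len(selected) >= 6:
--                 break
--             if idx_in_group[tail] < len(tail_groups[tail]):
--                 num, _ = tail_groups[tail][idx_in_group[tail]]
--                 if num not in selected:
--                     selected.append(num)
--                     added = True
--                 idx_in_group[tail] += 1
--         if not added: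
--             break
--     if len(selected) < 6:
--         remaining = [n for n in range(1, MAX_NUM + 1)
--                      if n not in selected and n not in exclude]
--         remaining.sort(key=lambda x: freq.get(x, 0), reverse=True)
--         selected.extend(remaining[:6 - len(selected)])
--     return sorted(selected[:6])
-- ===== SOURCE B (Python) =====
-- from collections import Counter
--
-- MAX_NUM = 49
--
-- def tail_balance_bet(history, window=100, exclude=None):
--     excl = set(exclude) if exclude else set()
--     recent = history[-window:] if len(history) >= window else history
--     freq = Counter(n for d in recent for n in d['numbers'])
--     cands = [n for n in range(1, MAX_NUM + 1) if n not in excl]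
--     tops = {}
--     for n in cands:
--         t, f = n % 10, freq.get(n, 0)
--         if t not in tops or f > tops[t]:
--             tops[t] = f
--     def tail_rank(t):
--         return sum(1 for u in tops
--                    if tops[u] > tops[t] or (tops[u] == tops[t] and u < t))
--     def within_rank(n):
--         f = freq.get(n, 0)
--         return sum(1 for m in cands if m % 10 == n % 10 and
--                    (freq.get(m, 0) > f or (freq.get(m, 0) == f and m < n)))
--     picked = sorted(cands, key=lambda n: within_rank(n) * 10 + tail_rank(n % 10))[:6]
--     return sorted(picked)
-- ===== Notes on version B (the rewrite author's own statement) =====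
-- stated objective: alternative
-- what changed: A's stateful while-loop round-robin (per-tail cursor dict, membership checks, dead fallback branch) is replaced by computing for each candidate a composite rank key (rank within its tail group by frequency, rank of the tail by its top frequency) via counting, then taking the 6 smallest candidates in one key-sort.
import Mathlib
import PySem

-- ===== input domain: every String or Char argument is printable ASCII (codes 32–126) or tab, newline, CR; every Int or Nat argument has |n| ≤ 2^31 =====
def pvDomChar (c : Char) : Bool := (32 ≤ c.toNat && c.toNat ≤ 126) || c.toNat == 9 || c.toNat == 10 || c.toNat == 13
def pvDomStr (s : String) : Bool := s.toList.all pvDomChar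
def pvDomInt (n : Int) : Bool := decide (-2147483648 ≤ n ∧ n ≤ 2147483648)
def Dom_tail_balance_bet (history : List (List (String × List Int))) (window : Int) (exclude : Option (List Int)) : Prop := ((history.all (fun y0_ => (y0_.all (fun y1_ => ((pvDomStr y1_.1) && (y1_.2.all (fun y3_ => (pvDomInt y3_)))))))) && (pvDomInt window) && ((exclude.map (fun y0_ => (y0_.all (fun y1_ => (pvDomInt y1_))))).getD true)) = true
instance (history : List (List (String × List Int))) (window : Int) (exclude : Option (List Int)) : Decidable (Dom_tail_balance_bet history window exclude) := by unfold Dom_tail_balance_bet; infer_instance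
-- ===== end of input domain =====

-- B replaces A's stateful round-robin while-loop by ranking each candidate with a composite
-- key (rank within its tail group, rank of the tail) and doing one key-sort (objective: alternative).

-- ===== PORT A =====
-- inner 'for tail in available_tails' loop of A's while-loop (with its two breaks)
def tbPassA (tg : PySem.Dict Int (List (Int × Int))) :
    List Int → List Int × PySem.Dict Int Int × Bool → List Int × PySem.Dict Int Int × Bool
  | [], st => st
  | tail :: rest, (sel, idx, added) =>
    if 6 ≤ sel.length then (sel, idx, added)
    else
      let g := tg.getD tail []
      let i := idx.getD tail 0
      if i < (g.length : Int) then
        match PySem.List.pyGet? g i with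
        | some p =>
          if sel.contains p.1 then tbPassA tg rest (sel, idx.insert tail (i + 1), added)
          else tbPassA tg rest (sel ++ [p.1], idx.insert tail (i + 1), true)
        | none => tbPassA tg rest (sel, idx.insert tail (i + 1), added)  -- unreachable (i < len)
      else tbPassA tg rest (sel, idx, added)

-- the 'while len(selected) < 6' loop; fuel 50 (the loop runs at most 7 passes)
def tbWhileA (tg : PySem.Dict Int (List (Int × Int))) (tails : List Int) :
    Nat → List Int → PySem.Dict Int Int → List Int
  | 0, sel, _ => sel
  | fuel + 1, sel, idx =>
    if sel.length < 6 then
      let r := tbPassA tg tails (sel, idx, false)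
      if r.2.2 then tbWhileA tg tails fuel r.1 r.2.1 else r.1
    else sel

def tail_balance_bet (history : List (List (String × List Int))) (window : Int) (exclude : Option (List Int)) : List Int :=
  let excl : List Int := exclude.getD []
  let recent := if window ≤ (history.length : Int) then PySem.List.slice history (some (-window)) none else history
  let all_nums := recent.flatMap (fun d => (PySem.Dict.mk d).getD "numbers" [])
  let freq := PySem.Dict.counter all_nums
  let tg0 : PySem.Dict Int (List (Int × Int)) :=
    (PySem.List.pyRange 0 10 1).foldl (fun d i => d.insert i []) PySem.Dict.empty
  let tg1 := (PySem.List.pyRange 1 50 1).foldl (fun d n =>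
      if excl.contains n then d
      else d.modify (PySem.Int.mod n 10) [] (fun l => l ++ [(n, freq.getD n 0)])) tg0
  let tg := tg1.keys.foldl (fun d t => d.modify t [] (fun l => PySem.List.sorted l (fun x => x.2) true)) tg1
  let available_tails := PySem.List.sorted
      ((PySem.List.pyRange 0 10 1).filter (fun t => !(tg.getD t []).isEmpty))
      (fun t => match tg.getD t [] with | [] => (0 : Int) | x :: _ => x.2) true
  let idx0 : PySem.Dict Int Int := (PySem.List.pyRange 0 10 1).foldl (fun d t => d.insert t 0) PySem.Dict.empty
  let selected := tbWhileA tg available_tails 50 [] idx0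
  let selected := if selected.length < 6 then
      selected ++ PySem.List.slice
        (PySem.List.sorted ((PySem.List.pyRange 1 50 1).filter
            (fun n => !selected.contains n && !excl.contains n)) (fun n => freq.getD n 0) true)
        none (some (6 - (selected.length : Int)))
    else selected
  PySem.List.sorted (PySem.List.slice selected none (some 6)) (fun x => x) false

-- ===== PORT B =====
def tbWithinRank (cands : List Int) (freq : PySem.Dict Int Int) (n : Int) : Int :=
  let f := freq.getD n 0
  (cands.countP (fun m => PySem.Int.mod m 10 == PySem.Int.mod n 10 &&
      (decide (f < freq.getD m 0) || (freq.getD m 0 == f && decide (m < n)))) : Int)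

def tbTailRank (tops : PySem.Dict Int Int) (t : Int) : Int :=
  (tops.keys.countP (fun u => decide (tops.getD t 0 < tops.getD u 0) ||
      (tops.getD u 0 == tops.getD t 0 && decide (u < t))) : Int)

def tail_balance_bet_alt (history : List (List (String × List Int))) (window : Int) (exclude : Option (List Int)) : List Int :=
  let excl : PySem.Set Int := PySem.Set.ofList (exclude.getD [])
  let recent := if window ≤ (history.length : Int) then PySem.List.slice history (some (-window)) none else history
  let freq := PySem.Dict.counter (recent.flatMap (fun d => (PySem.Dict.mk d).getD "numbers" []))
  let cands := (PySem.List.pyRange 1 50 1).filter (fun n => !(PySem.Set.contains excl n))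
  let tops : PySem.Dict Int Int := cands.foldl (fun d n =>
      let t := PySem.Int.mod n 10
      let f := freq.getD n 0
      if !d.contains t || decide (d.getD t 0 < f) then d.insert t f else d) PySem.Dict.empty
  let picked := PySem.List.slice
      (PySem.List.sorted cands
        (fun n => tbWithinRank cands freq n * 10 + tbTailRank tops (PySem.Int.mod n 10)) false)
      none (some 6)
  PySem.List.sorted picked (fun x => x) false

-- ===== PRECONDITION & SPEC =====
-- Pre_ excludes exactly the inputs where some examined draw dict lacks the key 'numbers',
-- on which the Python A raises KeyError.
def Pre_tail_balance_bet (history : List (List (String × List Int))) (window : Int) (exclude : Option (List Int)) : Prop :=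
  ∀ d ∈ (if window ≤ (history.length : Int) then PySem.List.slice history (some (-window)) none else history),
    (PySem.Dict.mk d).contains "numbers" = true
instance (history : List (List (String × List Int))) (window : Int) (exclude : Option (List Int)) : Decidable (Pre_tail_balance_bet history window exclude) := by unfold Pre_tail_balance_bet; infer_instance

def pvWitness_tail_balance_bet : (List (List (String × List Int))) × Int × Option (List Int) :=
  ([[("numbers", [3, 13, 23, 7, 7])], [("numbers", [3, 9])]], 100, some [7])

def Spec_tail_balance_bet (history : List (List (String × List Int))) (window : Int) (exclude : Option (List Int)) (out : List Int) : Prop := out = tail_balance_bet_alt history window exclude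
instance (history : List (List (String × List Int))) (window : Int) (exclude : Option (List Int)) (out : List Int) : Decidable (Spec_tail_balance_bet history window exclude out) := by unfold Spec_tail_balance_bet; infer_instance

-- ===== CLAIM (what is proved, stated in full; the proofs are below) =====
def Claim_equal_tail_balance_bet : Prop := ∀ (history : List (List (String × List Int))) (window : Int) (exclude : Option (List Int)), Dom_tail_balance_bet history window exclude → Pre_tail_balance_bet history window exclude → Spec_tail_balance_bet history window exclude (tail_balance_bet history window exclude)

-- ===== LEMMAS AND PROOFS =====


-- ---- the strict order realised by Python's stable reverse sort on an ascending base list ----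
def pvO (key : Int → Int) (a b : Int) : Prop := key b < key a ∨ (key a = key b ∧ a < b)

def pvOB (key : Int → Int) (n m : Int) : Bool :=
  decide (key n < key m) || (key m == key n && decide (m < n))

lemma pvOB_iff (key : Int → Int) (n m : Int) : pvOB key n m = true ↔ pvO key m n := by
  simp [pvOB, pvO]

lemma insertBy_pairwise (key : Int → Int) (x : Int) :
    ∀ acc : List Int, acc.Pairwise (pvO key) → (∀ y ∈ acc, y < x) →
      (PySem.List.insertBy (fun a b => decide (key b < key a)) x acc).Pairwise (pvO key)
  | [], _, _ => by simp [PySem.List.insertBy, pvO]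
  | y :: ys, hp, hlt => by
    rw [List.pairwise_cons] at hp
    simp only [PySem.List.insertBy]
    by_cases h : key y < key x
    · simp only [h, decide_true, if_pos]
      refine List.Pairwise.cons ?_ (List.Pairwise.cons hp.1 hp.2)
      intro z hz
      rcases List.mem_cons.mp hz with rfl | hz
      · exact Or.inl h
      · rcases hp.1 z hz with h' | h' <;> unfold pvO <;> omega
    · simp only [h, decide_false, if_neg, Bool.false_eq_true, not_false_iff]
      refine List.Pairwise.cons ?_ (insertBy_pairwise key x ys hp.2 (fun z hz => hlt z (List.mem_cons_of_mem _ hz)))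
      intro z hz
      rcases (PySem.List.mem_insertBy _ _ _ _).mp hz with rfl | hz
      · have := hlt y (List.mem_cons_self ..)
        unfold pvO; omega
      · exact hp.1 z hz

lemma foldl_insertBy_pairwise (key : Int → Int) :
    ∀ (xs acc : List Int), acc.Pairwise (pvO key) → (∀ x ∈ xs, ∀ y ∈ acc, y < x) →
      xs.Pairwise (· < ·) →
      (xs.foldl (fun acc x => PySem.List.insertBy (fun a b => decide (key b < key a)) x acc) acc).Pairwise (pvO key)
  | [], acc, hacc, _, _ => hacc
  | x :: xs, acc, hacc, hlt, hxs => by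
    rw [List.pairwise_cons] at hxs
    refine foldl_insertBy_pairwise key xs _ (insertBy_pairwise key x acc hacc (hlt x (List.mem_cons_self ..))) ?_ hxs.2
    intro x' hx' y hy
    rcases (PySem.List.mem_insertBy _ _ _ _).mp hy with rfl | hy
    · exact hxs.1 x' hx'
    · exact hlt x' (List.mem_cons_of_mem _ hx') y hy

lemma sorted_rev_stable (key : Int → Int) (xs : List Int) (h : xs.Pairwise (· < ·)) :
    (PySem.List.sorted xs key true).Pairwise (pvO key) := by
  rw [PySem.List.sorted_rev_eq_foldl_insertBy]
  exact foldl_insertBy_pairwise key xs [] (by simp) (by simp) h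

lemma countP_index (key : Int → Int) :
    ∀ (l : List Int) (k : Nat) (n : Int), l.Pairwise (pvO key) → l[k]? = some n →
      l.countP (pvOB key n) = k
  | [], k, n, _, hk => by simp at hk
  | h :: t, 0, n, hp, hk => by
    simp only [List.getElem?_cons_zero, Option.some_inj] at hk
    subst hk
    rw [List.pairwise_cons] at hp
    rw [List.countP_cons]
    have h1 : pvOB key h h = false := by
      rw [Bool.eq_false_iff]; intro hc
      have := (pvOB_iff _ _ _).mp hc; unfold pvO at this; omega
    have h2 : t.countP (pvOB key h) = 0 := by
      rw [List.countP_eq_zero]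
      intro m hm hc
      have h3 := (pvOB_iff _ _ _).mp hc
      have h4 := hp.1 m hm
      unfold pvO at h3 h4; omega
    simp [h1, h2]
  | h :: t, k + 1, n, hp, hk => by
    simp only [List.getElem?_cons_succ] at hk
    rw [List.pairwise_cons] at hp
    have hn : n ∈ t := List.mem_of_getElem? hk
    have h1 : pvOB key n h = true := (pvOB_iff _ _ _).mpr (hp.1 n hn)
    rw [List.countP_cons, countP_index key t k n hp.2 hk, h1]; simp


-- ---- map commutes with the stable reverse sort ----
lemma insertBy_map (g : Int → Int × Int) (key : Int × Int → Int) (x : Int) :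
    ∀ acc : List Int,
      PySem.List.insertBy (fun a b => decide (key b < key a)) (g x) (acc.map g)
        = (PySem.List.insertBy (fun a b => decide (key (g b) < key (g a))) x acc).map g
  | [] => by simp [PySem.List.insertBy]
  | y :: ys => by
    simp only [List.map_cons, PySem.List.insertBy]
    by_cases h : key (g y) < key (g x)
    · simp [h]
    · simp [h, insertBy_map g key x ys]

lemma foldl_insertBy_map (g : Int → Int × Int) (key : Int × Int → Int) :
    ∀ (l acc : List Int),
      l.foldl (fun acc x => PySem.List.insertBy (fun a b => decide (key b < key a)) (g x) acc) (acc.map g)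
        = (l.foldl (fun acc x => PySem.List.insertBy (fun a b => decide (key (g b) < key (g a))) x acc) acc).map g
  | [], acc => rfl
  | x :: l, acc => by
    simp only [List.foldl_cons]
    rw [insertBy_map g key x acc, foldl_insertBy_map g key l _]

lemma sorted_rev_map (g : Int → Int × Int) (key : Int × Int → Int) (l : List Int) :
    PySem.List.sorted (l.map g) key true = (PySem.List.sorted l (fun a => key (g a)) true).map g := by
  rw [PySem.List.sorted_rev_eq_foldl_insertBy, PySem.List.sorted_rev_eq_foldl_insertBy,
    List.foldl_map]
  exact foldl_insertBy_map g key l []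

-- ---- the specification-side objects: candidates, tail groups, tail order, round-robin passes ----
def pvCands (excl : List Int) : List Int :=
  (PySem.List.pyRange 1 50 1).filter (fun n => !excl.contains n)
def pvGrp (excl : List Int) (t : Int) : List Int :=
  (pvCands excl).filter (fun n => PySem.Int.mod n 10 == t)
def pvW (excl : List Int) (freq : PySem.Dict Int Int) (t : Int) : List Int :=
  PySem.List.sorted (pvGrp excl t) (fun n => freq.getD n 0) true
def pvTop (excl : List Int) (freq : PySem.Dict Int Int) (t : Int) : Int :=
  match pvW excl freq t with | [] => 0 | h :: _ => freq.getD h 0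
def pvT (excl : List Int) (freq : PySem.Dict Int Int) : List Int :=
  PySem.List.sorted ((PySem.List.pyRange 0 10 1).filter (fun t => !(pvW excl freq t).isEmpty))
    (pvTop excl freq) true
def pvP (excl : List Int) (freq : PySem.Dict Int Int) (k : Nat) : List Int :=
  (pvT excl freq).filterMap (fun t => (pvW excl freq t)[k]?)
def pvF (excl : List Int) (freq : PySem.Dict Int Int) : List Int :=
  (List.range 5).flatMap (pvP excl freq)

lemma fmod_ten (n : Int) : PySem.Int.mod n 10 = n % 10 := by
  simp [PySem.Int.mod, Int.fmod_eq_emod]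

lemma fmod_ten_lb (n : Int) : 0 ≤ PySem.Int.mod n 10 := by rw [fmod_ten]; omega
lemma fmod_ten_ub (n : Int) : PySem.Int.mod n 10 < 10 := by rw [fmod_ten]; omega

lemma pvGrp_pairwise_lt (excl : List Int) (t : Int) : (pvGrp excl t).Pairwise (· < ·) :=
  ((PySem.List.pairwise_lt_pyRange_one 1 50).filter _).filter _

lemma mem_pvGrp {excl : List Int} {t n : Int} :
    n ∈ pvGrp excl t ↔ n ∈ pvCands excl ∧ n % 10 = t := by
  simp [pvGrp, List.mem_filter, fmod_ten]

lemma pvW_pairwise (excl : List Int) (freq : PySem.Dict Int Int) (t : Int) :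
    (pvW excl freq t).Pairwise (pvO (fun n => freq.getD n 0)) :=
  sorted_rev_stable _ _ (pvGrp_pairwise_lt excl t)

lemma pvW_perm (excl : List Int) (freq : PySem.Dict Int Int) (t : Int) :
    (pvW excl freq t).Perm (pvGrp excl t) := PySem.List.sorted_perm _ _ _

lemma mem_pvW {excl : List Int} {freq : PySem.Dict Int Int} {t n : Int} :
    n ∈ pvW excl freq t ↔ n ∈ pvGrp excl t := PySem.List.mem_sorted _ _ _ _

lemma range_filter_mod_len_le5 (t : Int) :
    ((PySem.List.pyRange 1 50 1).filter (fun n => PySem.Int.mod n 10 == t)).length ≤ 5 := by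
  by_cases ht : 0 ≤ t ∧ t < 10
  · obtain ⟨h1, h2⟩ := ht
    interval_cases t <;> decide
  · have : ((PySem.List.pyRange 1 50 1).filter (fun n => PySem.Int.mod n 10 == t)) = [] := by
      rw [List.filter_eq_nil_iff]
      intro n _
      have := fmod_ten_lb n; have := fmod_ten_ub n
      simp only [beq_iff_eq, decide_eq_true_eq]
      omega
    simp only [this, List.length_nil]
    omega

lemma pvGrp_len_le5 (excl : List Int) (t : Int) : (pvGrp excl t).length ≤ 5 := by
  have h : pvGrp excl t = ((PySem.List.pyRange 1 50 1).filter (fun n => PySem.Int.mod n 10 == t)).filter (fun n => !excl.contains n) := by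
    rw [pvGrp, pvCands, List.filter_comm]
  rw [h]
  exact le_trans (List.length_filter_le _ _) (range_filter_mod_len_le5 t)

lemma pvW_len_le5 (excl : List Int) (freq : PySem.Dict Int Int) (t : Int) :
    (pvW excl freq t).length ≤ 5 := by
  rw [pvW, PySem.List.length_sorted]; exact pvGrp_len_le5 excl t

lemma pvT_pairwise (excl : List Int) (freq : PySem.Dict Int Int) :
    (pvT excl freq).Pairwise (pvO (pvTop excl freq)) :=
  sorted_rev_stable _ _ ((PySem.List.pairwise_lt_pyRange_one 0 10).filter _)

lemma mem_pvT {excl : List Int} {freq : PySem.Dict Int Int} {t : Int} :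
    t ∈ pvT excl freq ↔ (0 ≤ t ∧ t < 10 ∧ pvW excl freq t ≠ []) := by
  rw [pvT, PySem.List.mem_sorted, List.mem_filter]
  simp [PySem.List.mem_pyRange_one, and_assoc]

lemma pvT_nodup (excl : List Int) (freq : PySem.Dict Int Int) : (pvT excl freq).Nodup :=
  ((PySem.List.sorted_perm _ _ _).nodup_iff).mpr
    (((PySem.List.pairwise_lt_pyRange_one 0 10).filter _).imp ne_of_lt)

lemma pvT_len_le10 (excl : List Int) (freq : PySem.Dict Int Int) : (pvT excl freq).length ≤ 10 := by
  rw [pvT, PySem.List.length_sorted]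
  exact le_trans (List.length_filter_le _ _) (by rw [PySem.List.length_pyRange_one]; decide)


-- ---- characterising A's tail_groups / available_tails construction ----
lemma foldl_skip_if {δ α : Type} (c : α → Bool) (f : δ → α → δ) :
    ∀ (l : List α) (d : δ),
      l.foldl (fun d n => if c n then d else f d n) d = (l.filter (fun n => !c n)).foldl f d
  | [], _ => rfl
  | x :: l, d => by
    cases h : c x <;> simp [h, List.foldl_cons, foldl_skip_if c f l]

lemma getD_foldl_insert_nil :
    ∀ (l : List Int) (d : PySem.Dict Int (List (Int × Int))), (∀ k, d.getD k [] = []) →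
      ∀ t, (l.foldl (fun d i => d.insert i ([] : List (Int × Int))) d).getD t [] = []
  | [], _, hd, t => hd t
  | i :: l, d, hd, t => by
    simp only [List.foldl_cons]
    exact getD_foldl_insert_nil l _ (fun k => by rw [PySem.Dict.getD_insert]; split <;> simp [hd]) t

lemma getD_foldl_insert_zero :
    ∀ (l : List Int) (d : PySem.Dict Int Int), (∀ k, d.getD k 0 = 0) →
      ∀ t, (l.foldl (fun d i => d.insert i (0 : Int)) d).getD t 0 = 0
  | [], _, hd, t => hd t
  | i :: l, d, hd, t => by
    simp only [List.foldl_cons]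
    exact getD_foldl_insert_zero l _ (fun k => by rw [PySem.Dict.getD_insert]; split <;> simp [hd]) t

lemma set_update_of_forall_mem :
    ∀ (xs : List Int) (s : PySem.Set Int), (∀ x ∈ xs, x ∈ s) → PySem.Set.update s xs = s
  | [], s, _ => rfl
  | x :: xs, s, h => by
    have hx : PySem.Set.add s x = s := by
      have hm := h x (List.mem_cons_self ..)
      simp [PySem.Set.add, PySem.Set.contains, List.contains_eq_mem, hm]
    simp only [PySem.Set.update, List.foldl_cons] at *
    rw [hx]
    exact set_update_of_forall_mem xs s (fun y hy => h y (List.mem_cons_of_mem _ hy))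

lemma pvGrp_empty_of_out {excl : List Int} {t : Int} (ht : ¬(0 ≤ t ∧ t < 10)) :
    pvGrp excl t = [] := by
  rw [pvGrp, List.filter_eq_nil_iff]
  intro n _
  have := fmod_ten_lb n; have := fmod_ten_ub n
  simp only [beq_iff_eq]
  omega

lemma tg1_getD (excl : List Int) (freq : PySem.Dict Int Int)
    (tg0 : PySem.Dict Int (List (Int × Int))) (h0 : ∀ k, tg0.getD k [] = []) (t : Int) :
    ((PySem.List.pyRange 1 50 1).foldl (fun d n =>
        if excl.contains n then d
        else d.modify (PySem.Int.mod n 10) [] (fun l => l ++ [(n, freq.getD n 0)])) tg0).getD t []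
      = (pvGrp excl t).map (fun n => (n, freq.getD n 0)) := by
  rw [foldl_skip_if]
  have hm : ((pvCands excl).map (fun n => (PySem.Int.mod n 10, (n, freq.getD n 0)))).foldl
      (fun d p => d.modify p.1 [] (fun l => l ++ [p.2])) tg0
      = (pvCands excl).foldl (fun d n =>
          d.modify (PySem.Int.mod n 10) [] (fun l => l ++ [(n, freq.getD n 0)])) tg0 :=
    List.foldl_map
  rw [pvCands] at hm
  rw [← hm, PySem.Dict.getD_foldl_modify_append, h0, List.filter_map, List.map_map]
  simp only [List.nil_append]
  rfl

lemma keys_tg1 (excl : List Int) (freq : PySem.Dict Int Int) :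
    ((PySem.List.pyRange 1 50 1).foldl (fun d n =>
        if excl.contains n then d
        else d.modify (PySem.Int.mod n 10) [] (fun l => l ++ [(n, freq.getD n 0)]))
      ((PySem.List.pyRange 0 10 1).foldl (fun d i => d.insert i []) PySem.Dict.empty)).keys
      = PySem.List.pyRange 0 10 1 := by
  rw [foldl_skip_if]
  have hm : ((pvCands excl).map (fun n => (PySem.Int.mod n 10, (n, freq.getD n 0)))).foldl
      (fun d p => d.modify p.1 [] (fun l => l ++ [p.2])) _
      = (pvCands excl).foldl (fun d n =>
          d.modify (PySem.Int.mod n 10) [] (fun l => l ++ [(n, freq.getD n 0)])) ((PySem.List.pyRange 0 10 1).foldl (fun d i => d.insert i []) PySem.Dict.empty) :=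
    List.foldl_map
  rw [pvCands] at hm
  rw [← hm]
  have hk := PySem.Dict.keys_foldl_modify_key
      ((pvCands excl).map (fun n => (PySem.Int.mod n 10, (n, freq.getD n 0))))
      (fun p => p.1) [] (fun _ p l => l ++ [p.2])
      ((PySem.List.pyRange 0 10 1).foldl (fun d i => d.insert i []) PySem.Dict.empty)
  rw [pvCands] at hk
  rw [hk]
  have hkeys0 : ((PySem.List.pyRange 0 10 1).foldl (fun d i => d.insert i []) (PySem.Dict.empty : PySem.Dict Int (List (Int × Int)))).keys = PySem.List.pyRange 0 10 1 := by decide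
  rw [hkeys0]
  apply set_update_of_forall_mem
  intro x hx
  simp only [List.map_map, List.mem_map] at hx
  obtain ⟨n, _, rfl⟩ := hx
  have := fmod_ten_lb n; have := fmod_ten_ub n
  simp only [Function.comp_apply, PySem.List.mem_pyRange_one]
  omega

lemma getD_foldl_sortpass :
    ∀ (ks : List Int) (d : PySem.Dict Int (List (Int × Int))), ks.Nodup → ∀ t,
      (ks.foldl (fun d t => d.modify t [] (fun l => PySem.List.sorted l (fun x => x.2) true)) d).getD t []
        = if t ∈ ks then PySem.List.sorted (d.getD t []) (fun x => x.2) true else d.getD t []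
  | [], _, _, t => by simp
  | k :: ks, d, hnd, t => by
    rw [List.nodup_cons] at hnd
    simp only [List.foldl_cons]
    rw [getD_foldl_sortpass ks _ hnd.2 t]
    by_cases hk : t = k
    · subst hk
      simp [hnd.1, PySem.Dict.getD_modify]
    · rw [PySem.Dict.getD_modify]
      simp only [if_neg hk, List.mem_cons]
      by_cases ht : t ∈ ks <;> simp [ht, hk]


lemma tg_getD (excl : List Int) (freq : PySem.Dict Int Int) (t : Int) :
    (((PySem.List.pyRange 1 50 1).foldl (fun d n =>
          if excl.contains n then d
          else d.modify (PySem.Int.mod n 10) [] (fun l => l ++ [(n, freq.getD n 0)]))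
        ((PySem.List.pyRange 0 10 1).foldl (fun d i => d.insert i []) PySem.Dict.empty)).keys.foldl
        (fun d t => d.modify t [] (fun l => PySem.List.sorted l (fun x => x.2) true))
        ((PySem.List.pyRange 1 50 1).foldl (fun d n =>
          if excl.contains n then d
          else d.modify (PySem.Int.mod n 10) [] (fun l => l ++ [(n, freq.getD n 0)]))
        ((PySem.List.pyRange 0 10 1).foldl (fun d i => d.insert i []) PySem.Dict.empty))).getD t []
      = (pvW excl freq t).map (fun n => (n, freq.getD n 0)) := by
  have h0 : ∀ k, (((PySem.List.pyRange 0 10 1).foldl (fun d i => d.insert i []) PySem.Dict.empty) : PySem.Dict Int (List (Int × Int))).getD k [] = [] :=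
    getD_foldl_insert_nil _ _ (fun k => PySem.Dict.getD_empty k [])
  rw [keys_tg1 excl freq, getD_foldl_sortpass _ _ (PySem.List.nodup_pyRange_one 0 10) t,
    tg1_getD excl freq _ h0 t]
  by_cases ht : t ∈ PySem.List.pyRange 0 10 1
  · rw [if_pos ht, sorted_rev_map]
    rfl
  · rw [if_neg ht]
    rw [PySem.List.mem_pyRange_one] at ht
    have hgrp : pvGrp excl t = [] := pvGrp_empty_of_out (by omega)
    simp [pvW, hgrp, PySem.List.sorted]

lemma avail_eq (excl : List Int) (freq : PySem.Dict Int Int)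
    (tg : PySem.Dict Int (List (Int × Int)))
    (htg : ∀ t, tg.getD t [] = (pvW excl freq t).map (fun n => (n, freq.getD n 0))) :
    PySem.List.sorted ((PySem.List.pyRange 0 10 1).filter (fun t => !(tg.getD t []).isEmpty))
      (fun t => match tg.getD t [] with | [] => (0 : Int) | x :: _ => x.2) true = pvT excl freq := by
  have hfilter : (PySem.List.pyRange 0 10 1).filter (fun t => !(tg.getD t []).isEmpty)
      = (PySem.List.pyRange 0 10 1).filter (fun t => !(pvW excl freq t).isEmpty) := by
    apply List.filter_congr
    intro t _
    rw [htg t]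
    simp
  have hkey : (fun t => match tg.getD t [] with | [] => (0 : Int) | x :: _ => x.2) = pvTop excl freq := by
    funext t
    rw [htg t]
    cases hw : pvW excl freq t <;> simp [pvTop, hw]
  rw [hfilter, hkey, pvT]

lemma idx0_getD :
    ∀ t, (((PySem.List.pyRange 0 10 1).foldl (fun d t => d.insert t 0) PySem.Dict.empty) : PySem.Dict Int Int).getD t 0 = 0 :=
  getD_foldl_insert_zero _ _ (fun k => PySem.Dict.getD_empty k 0)


-- ---- characterising B's running-max 'tops' dict ----
def pvMMax : Option Int → List Int → Option Int
  | o, [] => o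
  | none, x :: xs => pvMMax (some x) xs
  | some v, x :: xs => pvMMax (some (if v < x then x else v)) xs

lemma pvMMax_some : ∀ (l : List Int) (v : Int), pvMMax (some v) l = some (l.foldl max v)
  | [], v => rfl
  | x :: xs, v => by
    have h : (if v < x then x else v) = max v x := by split <;> omega
    rw [pvMMax, h, pvMMax_some xs (max v x), List.foldl_cons]

lemma pvMMax_none_isSome : ∀ l : List Int, (pvMMax none l).isSome ↔ l ≠ []
  | [] => by simp [pvMMax]
  | x :: xs => by simp [pvMMax, pvMMax_some]

lemma tops_get? (freq : PySem.Dict Int Int) :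
    ∀ (l : List Int) (d : PySem.Dict Int Int) (t : Int),
      (l.foldl (fun d n =>
          if !d.contains (PySem.Int.mod n 10) || decide (d.getD (PySem.Int.mod n 10) 0 < freq.getD n 0)
          then d.insert (PySem.Int.mod n 10) (freq.getD n 0) else d) d).get? t
        = pvMMax (d.get? t) ((l.filter (fun n => PySem.Int.mod n 10 == t)).map (fun n => freq.getD n 0))
  | [], d, t => by simp [pvMMax]
  | n :: l, d, t => by
    simp only [List.foldl_cons]
    by_cases hmt : PySem.Int.mod n 10 = t
    · rw [hmt]
      have hfil : (n :: l).filter (fun n => PySem.Int.mod n 10 == t)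
          = n :: l.filter (fun n => PySem.Int.mod n 10 == t) := by
        simp [List.filter_cons]
        rw [← fmod_ten n]; exact hmt
      rw [hfil, List.map_cons]
      cases hg : d.get? t with
      | none =>
        have hc : d.contains t = false := by
          rw [PySem.Dict.contains_eq_isSome_get?, hg]; rfl
        rw [if_pos (by simp [hc])]
        rw [tops_get? freq l _ t, PySem.Dict.get?_insert_self, pvMMax]
      | some v =>
        have hc : d.contains t = true := by
          rw [PySem.Dict.contains_eq_isSome_get?, hg]; rfl
        have hgd : d.getD t 0 = v := by rw [PySem.Dict.getD_eq_get?_getD, hg]; rfl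
        by_cases hlt : v < freq.getD n 0
        · rw [if_pos (by simp [hc, hgd, hlt])]
          rw [tops_get? freq l _ t, PySem.Dict.get?_insert_self, pvMMax, if_pos hlt]
        · rw [if_neg (by simp [hc, hgd, hlt])]
          rw [tops_get? freq l _ t, hg, pvMMax, if_neg hlt]
    · have hfil : (n :: l).filter (fun n => PySem.Int.mod n 10 == t)
          = l.filter (fun n => PySem.Int.mod n 10 == t) := by
        simp [List.filter_cons]
        rw [← fmod_ten n]; exact hmt
      rw [hfil]
      by_cases hcond : (!d.contains (PySem.Int.mod n 10) || decide (d.getD (PySem.Int.mod n 10) 0 < freq.getD n 0)) = true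
      · rw [if_pos hcond, tops_get? freq l _ t,
          PySem.Dict.get?_insert_of_ne _ _ (fun h => hmt h.symm)]
      · rw [if_neg hcond, tops_get? freq l _ t]

lemma tops_keys_nodup (freq : PySem.Dict Int Int) :
    ∀ (l : List Int) (d : PySem.Dict Int Int), d.keys.Nodup →
      (l.foldl (fun d n =>
          if !d.contains (PySem.Int.mod n 10) || decide (d.getD (PySem.Int.mod n 10) 0 < freq.getD n 0)
          then d.insert (PySem.Int.mod n 10) (freq.getD n 0) else d) d).keys.Nodup
  | [], d, hd => hd
  | n :: l, d, hd => by
    simp only [List.foldl_cons]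
    split
    · exact tops_keys_nodup freq l _ (PySem.Dict.nodup_keys_insert _ _ _ hd)
    · exact tops_keys_nodup freq l _ hd


def pvTops (excl : List Int) (freq : PySem.Dict Int Int) : PySem.Dict Int Int :=
  (pvCands excl).foldl (fun d n =>
      if !d.contains (PySem.Int.mod n 10) || decide (d.getD (PySem.Int.mod n 10) 0 < freq.getD n 0)
      then d.insert (PySem.Int.mod n 10) (freq.getD n 0) else d) PySem.Dict.empty

lemma cands_eq (excl : List Int) :
    (PySem.List.pyRange 1 50 1).filter (fun n => !(PySem.Set.contains (PySem.Set.ofList excl) n)) = pvCands excl := by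
  apply List.filter_congr
  intro n _
  simp [PySem.Set.contains, List.contains_eq_mem, PySem.Set.mem_ofList]

lemma pvW_ne_nil_iff {excl : List Int} {freq : PySem.Dict Int Int} {t : Int} :
    pvW excl freq t ≠ [] ↔ pvGrp excl t ≠ [] := by
  rw [not_iff_not, pvW, PySem.List.sorted_eq_nil_iff]

lemma pvTops_get? (excl : List Int) (freq : PySem.Dict Int Int) (t : Int) :
    (pvTops excl freq).get? t = pvMMax none ((pvGrp excl t).map (fun n => freq.getD n 0)) := by
  rw [pvTops, tops_get? freq, PySem.Dict.get?_empty, pvGrp]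

lemma pvTops_getD (excl : List Int) (freq : PySem.Dict Int Int) (t : Int)
    (ht : pvW excl freq t ≠ []) : (pvTops excl freq).getD t 0 = pvTop excl freq t := by
  have hg : pvGrp excl t ≠ [] := pvW_ne_nil_iff.mp ht
  cases hgr : pvGrp excl t with
  | nil => exact absurd hgr hg
  | cons n gs =>
    cases hw : pvW excl freq t with
    | nil => exact absurd hw ht
    | cons h tl =>
      have hhead : ∀ y ∈ pvGrp excl t, freq.getD y 0 ≤ freq.getD h 0 :=
        PySem.List.key_head_sorted_rev_ge (pvGrp excl t) (fun n => freq.getD n 0) hw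
      have hmemh : h ∈ pvGrp excl t := by
        rw [← mem_pvW (excl := excl) (freq := freq) (t := t), hw]
        exact List.mem_cons_self ..
      rw [PySem.Dict.getD_eq_get?_getD, pvTops_get?, hgr, List.map_cons, pvMMax, pvMMax_some]
      simp only [Option.getD_some]
      have htop : pvTop excl freq t = freq.getD h 0 := by simp [pvTop, hw]
      rw [htop]
      apply le_antisymm
      · rcases PySem.List.foldl_max_mem ((gs.map (fun n => freq.getD n 0))) (freq.getD n 0) with he | he
        · rw [he]
          exact hhead n (by rw [hgr]; exact List.mem_cons_self ..)
        · obtain ⟨y, hy, hyv⟩ := List.mem_map.mp he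
          rw [← hyv]
          exact hhead y (by rw [hgr]; exact List.mem_cons_of_mem _ hy)
      · rw [hgr] at hmemh
        rcases List.mem_cons.mp hmemh with rfl | hmem
        · exact (PySem.List.le_foldl_max _ _).1
        · exact (PySem.List.le_foldl_max _ _).2 _ (List.mem_map_of_mem hmem)

lemma pvTops_mem_keys (excl : List Int) (freq : PySem.Dict Int Int) (u : Int) :
    u ∈ (pvTops excl freq).keys ↔ (0 ≤ u ∧ u < 10 ∧ pvW excl freq u ≠ []) := by
  rw [← PySem.Dict.contains_iff_mem_keys, PySem.Dict.contains_eq_isSome_get?, pvTops_get?]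
  rw [pvMMax_none_isSome]
  constructor
  · intro hne
    have hg : pvGrp excl u ≠ [] := by
      intro hnil; rw [hnil] at hne; exact hne rfl
    obtain ⟨m, hm⟩ := List.exists_mem_of_ne_nil _ hg
    obtain ⟨_, hmod⟩ := mem_pvGrp.mp hm
    refine ⟨by omega, by omega, pvW_ne_nil_iff.mpr hg⟩
  · rintro ⟨_, _, hne⟩
    have hg := pvW_ne_nil_iff.mp hne
    simp [hg]

lemma pvTops_keys_nodup (excl : List Int) (freq : PySem.Dict Int Int) :
    (pvTops excl freq).keys.Nodup := by
  apply tops_keys_nodup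
  simp [PySem.Dict.keys_empty]

lemma pvTops_keys_perm (excl : List Int) (freq : PySem.Dict Int Int) :
    (pvTops excl freq).keys.Perm
      ((PySem.List.pyRange 0 10 1).filter (fun t => !(pvW excl freq t).isEmpty)) := by
  rw [List.perm_ext_iff_of_nodup (pvTops_keys_nodup excl freq)
    ((PySem.List.nodup_pyRange_one 0 10).filter _)]
  intro a
  rw [pvTops_mem_keys, List.mem_filter, PySem.List.mem_pyRange_one]
  simp [List.isEmpty_iff, and_assoc]

lemma tailRank_eq (excl : List Int) (freq : PySem.Dict Int Int) (j : Nat) (t : Int)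
    (hjt : (pvT excl freq)[j]? = some t) :
    tbTailRank (pvTops excl freq) t = (j : Int) := by
  have htT : t ∈ pvT excl freq := List.mem_of_getElem? hjt
  have htW : pvW excl freq t ≠ [] := (mem_pvT.mp htT).2.2
  have hgdt : (pvTops excl freq).getD t 0 = pvTop excl freq t := pvTops_getD excl freq t htW
  rw [tbTailRank]
  have hcongr : (pvTops excl freq).keys.countP
      (fun u => decide ((pvTops excl freq).getD t 0 < (pvTops excl freq).getD u 0) ||
        ((pvTops excl freq).getD u 0 == (pvTops excl freq).getD t 0 && decide (u < t)))
      = (pvTops excl freq).keys.countP (pvOB (pvTop excl freq) t) := by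
    apply List.countP_congr
    intro u hu
    have huW : pvW excl freq u ≠ [] := ((pvTops_mem_keys excl freq u).mp hu).2.2
    rw [hgdt, pvTops_getD excl freq u huW, pvOB]
  rw [hcongr, (pvTops_keys_perm excl freq).countP_eq]
  have hperm2 : ((PySem.List.pyRange 0 10 1).filter (fun t => !(pvW excl freq t).isEmpty)).countP (pvOB (pvTop excl freq) t)
      = (pvT excl freq).countP (pvOB (pvTop excl freq) t) :=
    ((PySem.List.sorted_perm _ _ _).countP_eq _).symm
  rw [hperm2, countP_index (pvTop excl freq) _ j t (pvT_pairwise excl freq) hjt]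

lemma withinRank_eq (excl : List Int) (freq : PySem.Dict Int Int) (k : Nat) (n : Int)
    (hk : (pvW excl freq (PySem.Int.mod n 10))[k]? = some n) :
    tbWithinRank (pvCands excl) freq n = (k : Int) := by
  rw [tbWithinRank]
  have h1 : (pvCands excl).countP (fun m => PySem.Int.mod m 10 == PySem.Int.mod n 10 &&
        (decide (freq.getD n 0 < freq.getD m 0) || (freq.getD m 0 == freq.getD n 0 && decide (m < n))))
      = (pvGrp excl (PySem.Int.mod n 10)).countP (pvOB (fun x => freq.getD x 0) n) := by
    rw [pvGrp, List.countP_filter]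
    apply List.countP_congr
    intro m _
    rw [pvOB]
    constructor
    · intro h; rw [Bool.and_eq_true] at h; rw [Bool.and_eq_true]; exact ⟨h.2, h.1⟩
    · intro h; rw [Bool.and_eq_true] at h; rw [Bool.and_eq_true]; exact ⟨h.2, h.1⟩
  rw [h1, ((pvW_perm excl freq (PySem.Int.mod n 10)).countP_eq _).symm,
    countP_index (fun x => freq.getD x 0) _ k n (pvW_pairwise excl freq _) hk]


-- ---- the exhaustive round-robin list pvF, ordered by B's composite key ----
def pvKeyB (excl : List Int) (freq : PySem.Dict Int Int) (n : Int) : Int :=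
  tbWithinRank (pvCands excl) freq n * 10 + tbTailRank (pvTops excl freq) (PySem.Int.mod n 10)

lemma pvP_eq_nil_of_ge5 (excl : List Int) (freq : PySem.Dict Int Int) (k : Nat) (hk : 5 ≤ k) :
    pvP excl freq k = [] := by
  rw [pvP, List.filterMap_eq_nil_iff]
  intro t _
  rw [List.getElem?_eq_none_iff]
  exact le_trans (pvW_len_le5 excl freq t) hk

lemma pvT_rank_pairwise (excl : List Int) (freq : PySem.Dict Int Int) :
    (pvT excl freq).Pairwise (fun t u => tbTailRank (pvTops excl freq) t < tbTailRank (pvTops excl freq) u) := by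
  rw [List.pairwise_iff_getElem]
  intro i j hi hj hij
  rw [tailRank_eq excl freq i _ (List.getElem?_eq_getElem hi),
    tailRank_eq excl freq j _ (List.getElem?_eq_getElem hj)]
  exact_mod_cast hij

lemma pvP_elem_facts (excl : List Int) (freq : PySem.Dict Int Int) {t : Int} {k : Nat} {n : Int}
    (htT : t ∈ pvT excl freq) (hwk : (pvW excl freq t)[k]? = some n) :
    PySem.Int.mod n 10 = t ∧ pvKeyB excl freq n = 10 * (k : Int) + tbTailRank (pvTops excl freq) t
      ∧ 0 ≤ tbTailRank (pvTops excl freq) t ∧ tbTailRank (pvTops excl freq) t < 10 := by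
  have hnw : n ∈ pvW excl freq t := List.mem_of_getElem? hwk
  have hmod : PySem.Int.mod n 10 = t := by
    rw [fmod_ten]; exact (mem_pvGrp.mp (mem_pvW.mp hnw)).2
  have hwr : tbWithinRank (pvCands excl) freq n = (k : Int) :=
    withinRank_eq excl freq k n (by rw [hmod]; exact hwk)
  obtain ⟨j, hj, hjt⟩ := List.mem_iff_getElem.mp htT
  have htr : tbTailRank (pvTops excl freq) t = (j : Int) := by
    have h' : (pvT excl freq)[j]? = some t := by rw [List.getElem?_eq_getElem hj, hjt]
    exact tailRank_eq excl freq j t h'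
  have hlen := pvT_len_le10 excl freq
  refine ⟨hmod, ?_, ?_, ?_⟩
  · rw [pvKeyB, hwr, hmod]; ring
  · rw [htr]; positivity
  · rw [htr]; exact_mod_cast lt_of_lt_of_le hj hlen

lemma keyB_mem_pvP (excl : List Int) (freq : PySem.Dict Int Int) {k : Nat} {n : Int}
    (hn : n ∈ pvP excl freq k) :
    ∃ r : Int, 0 ≤ r ∧ r < 10 ∧ pvKeyB excl freq n = 10 * (k : Int) + r := by
  obtain ⟨t, htT, hwk⟩ := List.mem_filterMap.mp hn
  obtain ⟨_, hkey, h0, h10⟩ := pvP_elem_facts excl freq htT hwk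
  exact ⟨_, h0, h10, hkey⟩

lemma pvF_pairwise (excl : List Int) (freq : PySem.Dict Int Int) :
    (pvF excl freq).Pairwise (fun a b => pvKeyB excl freq a < pvKeyB excl freq b) := by
  rw [pvF, List.pairwise_flatMap]
  constructor
  · intro k _
    rw [pvP, List.pairwise_filterMap]
    refine (pvT_rank_pairwise excl freq).imp_of_mem ?_
    intro t u htT huT htu a ha b hb
    obtain ⟨hmoda, hka, _, _⟩ := pvP_elem_facts excl freq htT ha
    obtain ⟨hmodb, hkb, _, _⟩ := pvP_elem_facts excl freq huT hb
    rw [hka, hkb]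
    omega
  · refine List.pairwise_lt_range.imp ?_
    intro k k' hkk' a ha b hb
    obtain ⟨r, hr0, hr10, hra⟩ := keyB_mem_pvP excl freq ha
    obtain ⟨r', hr0', hr10', hrb⟩ := keyB_mem_pvP excl freq hb
    rw [hra, hrb]
    have : (k : Int) < (k' : Int) := by exact_mod_cast hkk'
    omega

lemma pvF_nodup (excl : List Int) (freq : PySem.Dict Int Int) : (pvF excl freq).Nodup :=
  (pvF_pairwise excl freq).imp (fun h => by rintro rfl; exact lt_irrefl _ h)

lemma mem_pvF {excl : List Int} {freq : PySem.Dict Int Int} {n : Int} :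
    n ∈ pvF excl freq ↔ n ∈ pvCands excl := by
  constructor
  · intro h
    obtain ⟨k, _, hk⟩ := List.mem_flatMap.mp h
    obtain ⟨t, _, hwk⟩ := List.mem_filterMap.mp hk
    exact (mem_pvGrp.mp (mem_pvW.mp (List.mem_of_getElem? hwk))).1
  · intro h
    have hg : n ∈ pvGrp excl (n % 10) := mem_pvGrp.mpr ⟨h, rfl⟩
    have hw : n ∈ pvW excl freq (n % 10) := mem_pvW.mpr hg
    obtain ⟨k, hk, hkn⟩ := List.mem_iff_getElem.mp hw
    have hk5 : k < 5 := lt_of_lt_of_le hk (pvW_len_le5 excl freq _)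
    rw [pvF, List.mem_flatMap]
    refine ⟨k, List.mem_range.mpr hk5, ?_⟩
    rw [pvP, List.mem_filterMap]
    refine ⟨n % 10, mem_pvT.mpr ⟨by omega, by omega, List.ne_nil_of_mem hw⟩, ?_⟩
    rw [List.getElem?_eq_getElem hk, hkn]

lemma pvCands_nodup (excl : List Int) : (pvCands excl).Nodup :=
  (PySem.List.nodup_pyRange_one 1 50).filter _

lemma pvF_perm (excl : List Int) (freq : PySem.Dict Int Int) :
    (pvF excl freq).Perm (pvCands excl) :=
  (List.perm_ext_iff_of_nodup (pvF_nodup excl freq) (pvCands_nodup excl)).mpr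
    (fun _ => mem_pvF)

lemma sortedB_eq_pvF (excl : List Int) (freq : PySem.Dict Int Int) :
    PySem.List.sorted (pvCands excl) (pvKeyB excl freq) false = pvF excl freq :=
  PySem.List.sorted_eq_of_perm_of_pairwise_lt _ _ _ (pvF_perm excl freq) (pvF_pairwise excl freq)


-- ---- A's inner for-loop performs one round-robin pass (truncated at 6 picks) ----
lemma tbPassA_spec (excl : List Int) (freq : PySem.Dict Int Int)
    (tg : PySem.Dict Int (List (Int × Int)))
    (htg : ∀ t, tg.getD t [] = (pvW excl freq t).map (fun n => (n, freq.getD n 0)))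
    (k : Nat) :
    ∀ (T' : List Int) (sel : List Int) (idx : PySem.Dict Int Int) (added : Bool),
      T'.Nodup →
      (∀ t ∈ T', idx.getD t 0 = ((min k (pvW excl freq t).length : Nat) : Int)) →
      (∀ n ∈ T'.filterMap (fun t => (pvW excl freq t)[k]?), n ∉ sel) →
      (T'.filterMap (fun t => (pvW excl freq t)[k]?)).Nodup →
      (tbPassA tg T' (sel, idx, added)).1
          = sel ++ (T'.filterMap (fun t => (pvW excl freq t)[k]?)).take (6 - sel.length)
      ∧ (tbPassA tg T' (sel, idx, added)).2.2
          = (added || !((T'.filterMap (fun t => (pvW excl freq t)[k]?)).take (6 - sel.length)).isEmpty)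
      ∧ ((tbPassA tg T' (sel, idx, added)).1.length < 6 →
          ∀ u, (tbPassA tg T' (sel, idx, added)).2.1.getD u 0
            = if u ∈ T' then ((min (k + 1) (pvW excl freq u).length : Nat) : Int) else idx.getD u 0)
  | [], sel, idx, added, _, _, _, _ => by
    refine ⟨by simp [tbPassA], by simp [tbPassA], ?_⟩
    intro _ u
    simp [tbPassA]
  | t :: T', sel, idx, added, hnd, hidx, hdisj, hndP => by
    rw [List.nodup_cons] at hnd
    by_cases h6 : 6 ≤ sel.length
    · have hres : tbPassA tg (t :: T') (sel, idx, added) = (sel, idx, added) := by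
        rw [tbPassA, if_pos h6]
      rw [hres]
      have htake : (6 - sel.length) = 0 := by omega
      refine ⟨by simp [htake], by simp [htake], ?_⟩
      intro h u
      exact absurd (by simpa using h) (by omega : ¬ sel.length < 6)
    · have hi : idx.getD t 0 = ((min k (pvW excl freq t).length : Nat) : Int) :=
        hidx t (List.mem_cons_self ..)
      have hglen : (tg.getD t []).length = (pvW excl freq t).length := by
        rw [htg t, List.length_map]
      by_cases hk : k < (pvW excl freq t).length
      · -- this tail still has a k-th element
        have hmin : min k (pvW excl freq t).length = k := Nat.min_eq_left hk.le
        have hcond : idx.getD t 0 < ((tg.getD t []).length : Int) := by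
          rw [hi, hmin, hglen]; exact_mod_cast hk
        have hget : PySem.List.pyGet? (tg.getD t []) (idx.getD t 0)
            = some ((pvW excl freq t)[k], freq.getD ((pvW excl freq t)[k]) 0) := by
          rw [hi, hmin, PySem.List.pyGet?_natCast, htg t, List.getElem?_map,
            List.getElem?_eq_getElem hk]
          rfl
        have hft : (pvW excl freq t)[k]? = some ((pvW excl freq t)[k]) :=
          List.getElem?_eq_getElem hk
        have hfm : (t :: T').filterMap (fun t => (pvW excl freq t)[k]?)
            = (pvW excl freq t)[k] :: T'.filterMap (fun t => (pvW excl freq t)[k]?) := by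
          rw [List.filterMap_cons, hft]
        rw [hfm] at hdisj hndP
        rw [List.nodup_cons] at hndP
        have hnmem : (pvW excl freq t)[k] ∉ sel := hdisj _ (List.mem_cons_self ..)
        have hcont : sel.contains ((pvW excl freq t)[k]) = false := by
          simp [List.contains_eq_mem, hnmem]
        have hres : tbPassA tg (t :: T') (sel, idx, added)
            = tbPassA tg T' (sel ++ [(pvW excl freq t)[k]], idx.insert t (idx.getD t 0 + 1), true) := by
          rw [tbPassA, if_neg h6]
          simp only [hget, hcond, if_pos, hcont]
          rfl
        have ih := tbPassA_spec excl freq tg htg k T'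
          (sel ++ [(pvW excl freq t)[k]]) (idx.insert t (idx.getD t 0 + 1)) true
          hnd.2
          (fun u hu => by
            rw [PySem.Dict.getD_insert, if_neg (by rintro rfl; exact hnd.1 hu)]
            exact hidx u (List.mem_cons_of_mem _ hu))
          (fun m hm => by
            rw [List.mem_append]
            rintro (hs | hs)
            · exact hdisj m (List.mem_cons_of_mem _ hm) hs
            · rw [List.mem_singleton] at hs
              exact hndP.1 (hs ▸ hm))
          hndP.2
        rw [hres]
        have hlen1 : (sel ++ [(pvW excl freq t)[k]]).length = sel.length + 1 := by simp
        have htake : ((t :: T').filterMap (fun t => (pvW excl freq t)[k]?)).take (6 - sel.length)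
            = (pvW excl freq t)[k] :: (T'.filterMap (fun t => (pvW excl freq t)[k]?)).take (6 - (sel.length + 1)) := by
          rw [hfm]
          have h61 : 6 - sel.length = (6 - (sel.length + 1)) + 1 := by omega
          rw [h61, List.take_succ_cons]
        refine ⟨?_, ?_, ?_⟩
        · rw [ih.1, htake, hlen1]
          simp
        · rw [ih.2.1, htake]
          simp
        · intro hlt u
          have := ih.2.2 hlt u
          rw [this]
          by_cases hu : u ∈ T'
          · rw [if_pos hu, if_pos (List.mem_cons_of_mem _ hu)]
          · rw [if_neg hu, PySem.Dict.getD_insert]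
            by_cases hut : u = t
            · subst hut
              rw [if_pos rfl, if_pos (List.mem_cons_self ..), hi, hmin]
              have : min (k + 1) (pvW excl freq u).length = k + 1 := by omega
              rw [this]
              push_cast
              ring
            · rw [if_neg hut, if_neg (by simp [hut, hu])]
      · -- this tail is exhausted
        have hmin : min k (pvW excl freq t).length = (pvW excl freq t).length :=
          Nat.min_eq_right (by omega)
        have hcond : ¬ idx.getD t 0 < ((tg.getD t []).length : Int) := by
          rw [hi, hmin, hglen]; omega
        have hft : (pvW excl freq t)[k]? = none := by
          rw [List.getElem?_eq_none_iff]; omega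
        have hfm : (t :: T').filterMap (fun t => (pvW excl freq t)[k]?)
            = T'.filterMap (fun t => (pvW excl freq t)[k]?) := by
          rw [List.filterMap_cons, hft]
        rw [hfm] at hdisj hndP
        have hres : tbPassA tg (t :: T') (sel, idx, added)
            = tbPassA tg T' (sel, idx, added) := by
          rw [tbPassA, if_neg h6]
          simp only [if_neg hcond]
        have ih := tbPassA_spec excl freq tg htg k T' sel idx added
          hnd.2 (fun u hu => hidx u (List.mem_cons_of_mem _ hu)) hdisj hndP
        rw [hres, hfm]
        refine ⟨ih.1, ih.2.1, ?_⟩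
        intro hlt u
        rw [ih.2.2 hlt u]
        by_cases hu : u ∈ T'
        · rw [if_pos hu, if_pos (List.mem_cons_of_mem _ hu)]
        · rw [if_neg hu]
          by_cases hut : u = t
          · subst hut
            rw [if_pos (List.mem_cons_self ..), hi, hmin]
            have : min (k + 1) (pvW excl freq u).length = (pvW excl freq u).length := by omega
            rw [this]
          · rw [if_neg (by simp [hut, hu])]


lemma pvP_mono_nil (excl : List Int) (freq : PySem.Dict Int Int) {k : Nat}
    (h : pvP excl freq k = []) : ∀ j, k ≤ j → pvP excl freq j = [] := by
  intro j hj
  rw [pvP, List.filterMap_eq_nil_iff] at h ⊢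
  intro t ht
  have := h t ht
  rw [List.getElem?_eq_none_iff] at this ⊢
  omega

lemma pvFlat_succ (excl : List Int) (freq : PySem.Dict Int Int) (k : Nat) :
    (List.range (k + 1)).flatMap (pvP excl freq)
      = (List.range k).flatMap (pvP excl freq) ++ pvP excl freq k := by
  rw [List.range_succ, List.flatMap_append]
  simp

lemma pvF_split (excl : List Int) (freq : PySem.Dict Int Int) (k : Nat) (hk : k ≤ 5) :
    pvF excl freq = (List.range k).flatMap (pvP excl freq)
      ++ ((List.range (5 - k)).map (k + ·)).flatMap (pvP excl freq) := by
  rw [pvF]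
  conv_lhs => rw [show (5 : Nat) = k + (5 - k) by omega]
  rw [List.range_add, List.flatMap_append]

lemma tbWhileA_spec (excl : List Int) (freq : PySem.Dict Int Int)
    (tg : PySem.Dict Int (List (Int × Int)))
    (htg : ∀ t, tg.getD t [] = (pvW excl freq t).map (fun n => (n, freq.getD n 0))) :
    ∀ (fuel k : Nat) (idx : PySem.Dict Int Int),
      k ≤ 5 →
      ((List.range k).flatMap (pvP excl freq)).length < 6 →
      7 - ((List.range k).flatMap (pvP excl freq)).length ≤ fuel →
      (∀ t ∈ pvT excl freq, idx.getD t 0 = ((min k (pvW excl freq t).length : Nat) : Int)) →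
      tbWhileA tg (pvT excl freq) fuel ((List.range k).flatMap (pvP excl freq)) idx
        = (pvF excl freq).take 6
  | 0, k, idx => by
    intro _ hlen hfuel _
    omega
  | fuel + 1, k, idx => by
    intro hk5 hlen hfuel hidx
    have hsplit1 := pvF_split excl freq k hk5
    have hnodupF := pvF_nodup excl freq
    -- nodup / disjointness of (flat k) and (pvP k)
    have hnodFK : ((List.range k).flatMap (pvP excl freq) ++ pvP excl freq k).Nodup := by
      by_cases hk5' : k < 5
      · have hsplit2 := pvF_split excl freq (k + 1) (by omega)
        rw [pvFlat_succ] at hsplit2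
        rw [hsplit2, List.nodup_append] at hnodupF
        exact hnodupF.1
      · have : k = 5 := by omega
        subst this
        rw [pvP_eq_nil_of_ge5 excl freq 5 le_rfl, List.append_nil]
        rw [pvF] at hnodupF
        exact hnodupF
    rw [List.nodup_append] at hnodFK
    have hpass := tbPassA_spec excl freq tg htg k (pvT excl freq)
      ((List.range k).flatMap (pvP excl freq)) idx false
      (pvT_nodup excl freq) hidx
      (fun n hn hmem => hnodFK.2.2 n hmem n hn rfl)
      hnodFK.2.1
    have hPdef : (pvT excl freq).filterMap (fun t => (pvW excl freq t)[k]?) = pvP excl freq k := rfl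
    rw [hPdef] at hpass
    set sel := (List.range k).flatMap (pvP excl freq) with hsel
    set r := tbPassA tg (pvT excl freq) (sel, idx, false) with hr
    have hstep : tbWhileA tg (pvT excl freq) (fuel + 1) sel idx
        = if r.2.2 then tbWhileA tg (pvT excl freq) fuel r.1 r.2.1 else r.1 := by
      rw [tbWhileA, if_pos hlen]
    clear_value sel r
    by_cases hE : ((pvP excl freq k).take (6 - sel.length)).isEmpty
    · -- nothing could be added: every group is exhausted, sel is all of pvF
      have hPk : pvP excl freq k = [] := by
        have h0 := congrArg List.length (List.isEmpty_iff.mp hE)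
        rw [List.length_take, List.length_nil] at h0
        exact List.eq_nil_of_length_eq_zero (by omega)
      have hrest : ((List.range (5 - k)).map (k + ·)).flatMap (pvP excl freq) = [] := by
        rw [List.flatMap_eq_nil_iff]
        intro j hj
        obtain ⟨i, _, rfl⟩ := List.mem_map.mp hj
        exact pvP_mono_nil excl freq hPk _ (by omega)
      have hFeq : pvF excl freq = sel := by rw [hsplit1, hrest, List.append_nil]
      have hadded : r.2.2 = false := by
        rw [hpass.2.1]
        simp [hE]
      rw [hstep, hadded, if_neg (by simp), hpass.1, hPk]
      have htk : sel.take 6 = sel := List.take_of_length_le (by omega)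
      rw [hFeq, htk]
      simp
    · -- at least one pick was appended
      have hadded : r.2.2 = true := by
        rw [hpass.2.1]
        simp [hE]
      have hPkne : pvP excl freq k ≠ [] := by
        intro h
        rw [h] at hE
        simp at hE
      have hk5' : k < 5 := by
        rcases Nat.lt_or_ge k 5 with h | h
        · exact h
        · exact absurd (pvP_eq_nil_of_ge5 excl freq k h) hPkne
      have hsplit2 : pvF excl freq = (sel ++ pvP excl freq k)
          ++ ((List.range (5 - (k + 1))).map ((k + 1) + ·)).flatMap (pvP excl freq) := by
        rw [hsel, ← pvFlat_succ, ← pvF_split excl freq (k + 1) (by omega)]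
      rw [hstep, hadded, if_pos rfl]
      by_cases hlen' : r.1.length < 6
      · -- the pass completed without reaching 6 picks
        have hfull : (pvP excl freq k).take (6 - sel.length) = pvP excl freq k := by
          have h1 : r.1.length = sel.length + min (6 - sel.length) (pvP excl freq k).length := by
            rw [hpass.1]
            simp [List.length_take]
          apply List.take_of_length_le
          omega
        have hr1 : r.1 = (List.range (k + 1)).flatMap (pvP excl freq) := by
          rw [hpass.1, hfull, pvFlat_succ, hsel]
        have hlen2 : ((List.range (k + 1)).flatMap (pvP excl freq)).length < 6 := by
          rw [← hr1]; exact hlen'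
        have hsellen : sel.length = ((List.range k).flatMap (pvP excl freq)).length := by
          rw [hsel]
        have hgrow : sel.length < ((List.range (k + 1)).flatMap (pvP excl freq)).length := by
          rw [pvFlat_succ, List.length_append]
          have := List.length_pos_of_ne_nil hPkne
          omega
        have hidx' : ∀ t ∈ pvT excl freq,
            r.2.1.getD t 0 = ((min (k + 1) (pvW excl freq t).length : Nat) : Int) := by
          intro t ht
          rw [hpass.2.2 hlen' t, if_pos ht]
        rw [hr1]
        exact tbWhileA_spec excl freq tg htg fuel (k + 1) r.2.1 (by omega) hlen2 (by omega) hidx'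
      · -- the pass hit the 6-pick limit: one more iteration returns r.1 unchanged
        obtain ⟨f, rfl⟩ : ∃ f, fuel = f + 1 := by
          cases fuel with
          | zero => omega
          | succ f => exact ⟨f, rfl⟩
        rw [tbWhileA, if_neg hlen']
        rw [hpass.1]
        have h1 : r.1.length = sel.length + min (6 - sel.length) (pvP excl freq k).length := by
          rw [hpass.1]
          simp [List.length_take]
        have hPklen : 6 - sel.length ≤ (pvP excl freq k).length := by omega
        rw [hsplit2, List.take_append, List.take_append]
        have h2 : List.take 6 sel = sel := List.take_of_length_le (by omega)
        have h3 : (6 - sel.length) ≤ (pvP excl freq k).length := hPklen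
        have h4 : List.take (6 - (sel ++ pvP excl freq k).length)
            (((List.range (5 - (k + 1))).map ((k + 1) + ·)).flatMap (pvP excl freq)) = [] := by
          have : 6 - (sel ++ pvP excl freq k).length = 0 := by
            rw [List.length_append]; omega
          rw [this, List.take_zero]
        rw [h2, h4, List.append_nil]

lemma tbWhileA_main (excl : List Int) (freq : PySem.Dict Int Int)
    (tg : PySem.Dict Int (List (Int × Int)))
    (htg : ∀ t, tg.getD t [] = (pvW excl freq t).map (fun n => (n, freq.getD n 0))) :
    tbWhileA tg (pvT excl freq) 50 []
        ((PySem.List.pyRange 0 10 1).foldl (fun d t => d.insert t 0) PySem.Dict.empty)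
      = (pvF excl freq).take 6 := by
  have h := tbWhileA_spec excl freq tg htg 50 0
    ((PySem.List.pyRange 0 10 1).foldl (fun d t => d.insert t 0) PySem.Dict.empty)
    (by omega) (by simp) (by simp)
    (fun t _ => by rw [idx0_getD t]; simp)
  simpa using h

lemma remaining_empty (excl : List Int) (freq : PySem.Dict Int Int)
    (hlt : ((pvF excl freq).take 6).length < 6) :
    (PySem.List.pyRange 1 50 1).filter
      (fun n => !((pvF excl freq).take 6).contains n && !excl.contains n) = [] := by
  have hF : (pvF excl freq).take 6 = pvF excl freq := by
    rw [List.length_take] at hlt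
    exact List.take_of_length_le (by omega)
  rw [List.filter_eq_nil_iff]
  intro n hn
  by_cases hex : n ∈ excl
  · simp [List.contains_eq_mem, hex]
  · have hc : n ∈ pvCands excl := by
      rw [pvCands, List.mem_filter]
      exact ⟨hn, by simp [List.contains_eq_mem, hex]⟩
    have : n ∈ (pvF excl freq).take 6 := by rw [hF]; exact mem_pvF.mpr hc
    simp [List.contains_eq_mem, this]

-- ===== VERDICT (by name: the statement is the Claim_ definition above) =====
theorem tail_balance_bet_spec : Claim_equal_tail_balance_bet := by
  intro history window exclude _ _
  unfold Spec_tail_balance_bet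
  simp only [tail_balance_bet, tail_balance_bet_alt]
  set excl := exclude.getD [] with hexcl
  set freq := PySem.Dict.counter ((if window ≤ (history.length : Int) then PySem.List.slice history (some (-window)) none else history).flatMap (fun d => (PySem.Dict.mk d).getD "numbers" [])) with hfreq
  set tg1 := (PySem.List.pyRange 1 50 1).foldl (fun d n =>
      if excl.contains n then d
      else d.modify (PySem.Int.mod n 10) [] (fun l => l ++ [(n, freq.getD n 0)]))
      ((PySem.List.pyRange 0 10 1).foldl (fun d i => d.insert i []) PySem.Dict.empty) with htg1
  set tg := tg1.keys.foldl (fun d t => d.modify t [] (fun l => PySem.List.sorted l (fun x => x.2) true)) tg1 with htg2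
  have htg : ∀ t, tg.getD t [] = (pvW excl freq t).map (fun n => (n, freq.getD n 0)) := by
    intro t
    rw [htg2, htg1]
    exact tg_getD excl freq t
  rw [avail_eq excl freq tg htg, tbWhileA_main excl freq tg htg]
  rw [cands_eq excl]
  have hkeyfn : (fun n => tbWithinRank (pvCands excl) freq n * 10 +
      tbTailRank ((pvCands excl).foldl (fun d n =>
        if !d.contains (PySem.Int.mod n 10) || decide (d.getD (PySem.Int.mod n 10) 0 < freq.getD n 0)
        then d.insert (PySem.Int.mod n 10) (freq.getD n 0) else d) PySem.Dict.empty)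
      (PySem.Int.mod n 10)) = pvKeyB excl freq := rfl
  rw [hkeyfn, sortedB_eq_pvF excl freq]
  by_cases hlen : ((pvF excl freq).take 6).length < 6
  · rw [if_pos hlen, remaining_empty excl freq hlen]
    have h1 : PySem.List.sorted ([] : List Int) (fun n => freq.getD n 0) true = [] := rfl
    rw [h1]
    have h2 : PySem.List.slice ([] : List Int) none (some (6 - (((pvF excl freq).take 6).length : Int))) = [] := by
      simp [PySem.List.slice]
    rw [h2, List.append_nil]
    rw [PySem.List.slice_to _ (by norm_num : (0:Int) ≤ 6), PySem.List.slice_to _ (by norm_num : (0:Int) ≤ 6)]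
    norm_num [List.take_take]
  · rw [if_neg hlen]
    rw [PySem.List.slice_to _ (by norm_num : (0:Int) ≤ 6), PySem.List.slice_to _ (by norm_num : (0:Int) ≤ 6)]
    norm_num [List.take_take]
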